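-- pv_equiv track=rewrite | github.com/Aryudesu/ABC | tessoku/14.py | calc
-- ===== SOURCE A (Python) =====
-- def calc(K, A, B, C, D):
--     AB = set()
--     CD = set()
--     for a in A:
--         for b in B:
--             AB.add(a + b)
--
--     for c in C:
--         for d in D:
--             CD.add(c + d)
--
--     for ab in AB:
--         if K - ab in CD:
--             return True
--     return False
-- ===== SOURCE B (Python) =====
-- def calc(K, A, B, C, D):
--     # Sort-based two-pointer: sorted unique AB sums ascending, CD sums descending,
--     # then a single merge-like scan looking for ab + cd == K.
--     ab = sorted({a + b for a in A for b in B})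
--     cd = sorted({c + d for c in C for d in D}, reverse=True)
--     i = j = 0
--     while i < len(ab) and j < len(cd):
--         s = ab[i] + cd[j]
--         if s == K:
--             return True
--         if s < K:
--             i += 1
--         else:
--             j += 1
--     return False
-- ===== Notes on version B (the rewrite author's own statement) =====
-- stated objective: alternative
-- what changed: Replaces the hash-set complement lookup with a sort-plus-two-pointer algorithm: the AB sums are sorted ascending, the CD sums sorted descending, and a single merge-like scan advances one of two pointers until it meets ab+cd==K or exhausts a list.
import Mathlib
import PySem

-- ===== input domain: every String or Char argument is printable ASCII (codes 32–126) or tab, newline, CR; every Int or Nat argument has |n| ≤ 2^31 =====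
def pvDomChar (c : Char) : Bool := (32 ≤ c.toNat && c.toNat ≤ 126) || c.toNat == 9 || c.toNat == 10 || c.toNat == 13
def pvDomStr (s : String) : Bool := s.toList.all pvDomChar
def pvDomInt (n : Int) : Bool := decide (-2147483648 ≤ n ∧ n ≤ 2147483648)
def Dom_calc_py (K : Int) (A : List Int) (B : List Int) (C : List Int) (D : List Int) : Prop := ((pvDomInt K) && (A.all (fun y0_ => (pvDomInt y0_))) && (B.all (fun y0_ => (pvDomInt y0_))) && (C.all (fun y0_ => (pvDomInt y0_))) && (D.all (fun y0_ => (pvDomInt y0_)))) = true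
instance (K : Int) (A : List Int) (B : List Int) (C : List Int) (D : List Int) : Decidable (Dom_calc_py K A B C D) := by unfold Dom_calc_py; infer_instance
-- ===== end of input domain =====

-- B replaces the hash-set complement lookup by sorting the two pair-sum lists and a two-pointer merge scan (alternative algorithm).


-- ===== PORT A =====
-- AB and CD sets built by nested loops; then scan AB for K - ab in CD
-- (the scan's result is order-independent, so iterating the Set is exact).
def calc_py (K : Int) (A : List Int) (B : List Int) (C : List Int) (D : List Int) : Bool :=
  let AB : PySem.Set Int :=
    A.foldl (fun s a => B.foldl (fun s b => PySem.Set.add s (a + b)) s) PySem.Set.empty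
  let CD : PySem.Set Int :=
    C.foldl (fun s c => D.foldl (fun s d => PySem.Set.add s (c + d)) s) PySem.Set.empty
  AB.any (fun ab => PySem.Set.contains CD (K - ab))

-- ===== PORT B =====
-- the while loop over indices i, j becomes the obvious recursion consuming
-- the suffix of ab from i and the suffix of cd from j
def twoPtr (K : Int) : List Int → List Int → Bool
  | [], _ => false
  | _ :: _, [] => false
  | x :: xs, y :: ys =>
    if x + y = K then true
    else if x + y < K then twoPtr K xs (y :: ys)
    else twoPtr K (x :: xs) ys
termination_by ab cd => ab.length + cd.length

def calc_py_alt (K : Int) (A : List Int) (B : List Int) (C : List Int) (D : List Int) : Bool :=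
  let ab : List Int := PySem.List.sorted
    ((A.foldl (fun s a => B.foldl (fun s b => PySem.Set.add s (a + b)) s) PySem.Set.empty : PySem.Set Int) : List Int)
    (fun x => x) false
  let cd : List Int := PySem.List.sorted
    ((C.foldl (fun s c => D.foldl (fun s d => PySem.Set.add s (c + d)) s) PySem.Set.empty : PySem.Set Int) : List Int)
    (fun x => x) true
  twoPtr K ab cd

-- ===== PRECONDITION & SPEC =====
def Spec_calc_py (K : Int) (A : List Int) (B : List Int) (C : List Int) (D : List Int) (out : Bool) : Prop := out = calc_py_alt K A B C D
instance (K : Int) (A : List Int) (B : List Int) (C : List Int) (D : List Int) (out : Bool) : Decidable (Spec_calc_py K A B C D out) := by unfold Spec_calc_py; infer_instance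

-- ===== CLAIM (what is proved, stated in full; the proofs are below) =====
def Claim_equal_calc_py : Prop := ∀ (K : Int) (A : List Int) (B : List Int) (C : List Int) (D : List Int), Dom_calc_py K A B C D → Spec_calc_py K A B C D (calc_py K A B C D)

-- ===== LEMMAS AND PROOFS =====

-- membership in the inner fold over B
theorem mem_innerFold (x a : Int) (B : List Int) (t : PySem.Set Int) :
    x ∈ B.foldl (fun s b => PySem.Set.add s (a + b)) t ↔ x ∈ t ∨ ∃ b ∈ B, x = a + b := by
  induction B generalizing t with
  | nil => simp
  | cons b B ihB =>
    rw [List.foldl_cons, ihB]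
    simp [PySem.Set.mem_add]
    tauto

-- membership in the pair-sum set built by the nested foldl
theorem mem_pairSet (x : Int) (A B : List Int) (s0 : PySem.Set Int) :
    x ∈ A.foldl (fun s a => B.foldl (fun s b => PySem.Set.add s (a + b)) s) s0 ↔
      x ∈ s0 ∨ ∃ a ∈ A, ∃ b ∈ B, x = a + b := by
  induction A generalizing s0 with
  | nil => simp
  | cons a A ih =>
    simp only [List.foldl_cons, ih, mem_innerFold, List.mem_cons]
    constructor
    · rintro ((h | ⟨b, hb, rfl⟩) | ⟨a', ha', b, hb, rfl⟩)
      · exact Or.inl h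
      · exact Or.inr ⟨a, Or.inl rfl, b, hb, rfl⟩
      · exact Or.inr ⟨a', Or.inr ha', b, hb, rfl⟩
    · rintro (h | ⟨a', (rfl | ha'), b, hb, rfl⟩)
      · exact Or.inl (Or.inl h)
      · exact Or.inl (Or.inr ⟨b, hb, rfl⟩)
      · exact Or.inr ⟨a', ha', b, hb, rfl⟩

-- correctness of the two-pointer scan on an ascending ab and a descending cd
theorem twoPtr_iff (K : Int) (ab cd : List Int)
    (hab : ab.Pairwise (fun p q => p ≤ q)) (hcd : cd.Pairwise (fun p q => q ≤ p)) :
    twoPtr K ab cd = true ↔ ∃ x ∈ ab, ∃ y ∈ cd, x + y = K := by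
  induction ab, cd using twoPtr.induct K with
  | case1 cd => simp [twoPtr]
  | case2 x xs => simp [twoPtr]
  | case3 x xs y ys heq =>
    simp only [twoPtr, heq, if_true]
    exact (iff_true_intro ⟨x, List.mem_cons_self, y, List.mem_cons_self, heq⟩).symm
  | case4 x xs y ys hne hlt ih =>
    rw [twoPtr, if_neg hne, if_pos hlt,
      ih (List.Pairwise.of_cons hab) hcd]
    constructor
    · rintro ⟨x', hx', y', hy', h⟩
      exact ⟨x', List.mem_cons_of_mem _ hx', y', hy', h⟩
    · rintro ⟨x', hx', y', hy', h⟩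
      rcases List.mem_cons.1 hx' with rfl | hx'
      · -- x' = x: impossible, since every y' ∈ y :: ys has y' ≤ y and x + y < K
        exfalso
        have hy'le : y' ≤ y := by
          rcases List.mem_cons.1 hy' with rfl | hy'
          · exact le_refl _
          · exact (List.rel_of_pairwise_cons hcd) hy'
        omega
      · exact ⟨x', hx', y', hy', h⟩
  | case5 x xs y ys hne hge ih =>
    rw [twoPtr, if_neg hne, if_neg hge,
      ih hab (List.Pairwise.of_cons hcd)]
    constructor
    · rintro ⟨x', hx', y', hy', h⟩
      exact ⟨x', hx', y', List.mem_cons_of_mem _ hy', h⟩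
    · rintro ⟨x', hx', y', hy', h⟩
      rcases List.mem_cons.1 hy' with rfl | hy'
      · exfalso
        have hx'ge : x ≤ x' := by
          rcases List.mem_cons.1 hx' with rfl | hx'
          · exact le_refl _
          · exact (List.rel_of_pairwise_cons hab) hx'
        omega
      · exact ⟨x', hx', y', hy', h⟩

theorem calc_py_eq (K : Int) (A B C D : List Int) :
    calc_py K A B C D = calc_py_alt K A B C D := by
  unfold calc_py calc_py_alt
  rw [Bool.eq_iff_iff]
  rw [twoPtr_iff K _ _
    (by simpa using PySem.List.sorted_pairwise _ (fun x : Int => x))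
    (by simpa using PySem.List.sorted_pairwise_rev _ (fun x : Int => x))]
  simp only [List.any_eq_true, PySem.Set.contains_iff, PySem.List.mem_sorted]
  constructor
  · rintro ⟨ab, hab, hcd⟩
    rcases (mem_pairSet ab A B PySem.Set.empty).1 hab with h | ⟨a, ha, b, hb, rfl⟩
    · simp [PySem.Set.empty] at h
    · exact ⟨a + b, hab, K - (a + b), hcd, by ring⟩
  · rintro ⟨x, hx, y, hy, hsum⟩
    refine ⟨x, hx, ?_⟩
    have : K - x = y := by omega
    rwa [this]

-- ===== VERDICT (by name: the statement is the Claim_ definition above) =====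
theorem calc_py_spec : Claim_equal_calc_py := by
  intro K A B C D _
  unfold Spec_calc_py
  exact calc_py_eq K A B C D
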